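-- pv_equiv track=rewrite | github.com/melli0-0/SWPPython25-26 | SWPpy/uebung.py | steuer
-- ===== SOURCE A (Python) =====
-- def steuer(liste):
--     steuergruppe: dict = {'0':0, '1':0, '2':0, '3':0}
--     for elem in liste:
--         i = None
--         match elem:
--             case e if e <= 10000:
--                i = 0
--             case e if e <= 30000: i=1
--             case e if e <= 70000: i=2
--             case _: i=3
--         steuergruppe[f"{i}"] += 1
--
--     return steuergruppe
-- ===== SOURCE B (Python) =====
-- def steuer(liste):
--     c1 = sum(1 for e in liste if e <= 10000)
--     c2 = sum(1 for e in liste if e <= 30000)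
--     c3 = sum(1 for e in liste if e <= 70000)
--     return {'0': c1, '1': c2 - c1, '2': c3 - c2, '3': len(liste) - c3}
-- ===== Notes on version B (the rewrite author's own statement) =====
-- stated objective: simpler
-- what changed: Replaces the per-element match/dict-increment loop by three cumulative threshold counts whose differences fill the four brackets, building the dict once at the end.
import Mathlib
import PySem

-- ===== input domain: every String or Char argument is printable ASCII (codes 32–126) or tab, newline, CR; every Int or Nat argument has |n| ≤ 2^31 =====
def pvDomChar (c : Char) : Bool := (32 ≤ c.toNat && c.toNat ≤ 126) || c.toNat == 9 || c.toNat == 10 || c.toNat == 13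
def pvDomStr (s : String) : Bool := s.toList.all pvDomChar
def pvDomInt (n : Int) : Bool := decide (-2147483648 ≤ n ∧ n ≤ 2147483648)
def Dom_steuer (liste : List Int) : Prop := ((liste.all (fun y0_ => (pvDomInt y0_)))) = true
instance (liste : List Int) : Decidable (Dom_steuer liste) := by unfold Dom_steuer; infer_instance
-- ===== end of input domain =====

-- B replaces A's per-element match/dict-increment loop by three cumulative threshold
-- counts whose differences fill the four brackets (objective: simpler).

-- ===== PORT A =====
def steuer (liste : List Int) : List (String × Int) :=
  let init : PySem.Dict String Int :=
    (((PySem.Dict.empty.insert "0" 0).insert "1" 0).insert "2" 0).insert "3" 0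
  (liste.foldl (fun d elem =>
      let i : Int :=
        if elem ≤ 10000 then 0
        else if elem ≤ 30000 then 1
        else if elem ≤ 70000 then 2
        else 3
      d.modify (PySem.Int.toStr i) 0 (· + 1)) init).items

-- ===== PORT B =====
def steuer_alt (liste : List Int) : List (String × Int) :=
  let c1 : Int := liste.countP (fun e => e ≤ 10000)
  let c2 : Int := liste.countP (fun e => e ≤ 30000)
  let c3 : Int := liste.countP (fun e => e ≤ 70000)
  [("0", c1), ("1", c2 - c1), ("2", c3 - c2), ("3", (liste.length : Int) - c3)]

-- ===== PRECONDITION & SPEC =====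
def Spec_steuer (liste : List Int) (out : List (String × Int)) : Prop := out = steuer_alt liste
instance (liste : List Int) (out : List (String × Int)) : Decidable (Spec_steuer liste out) := by unfold Spec_steuer; infer_instance

-- ===== CLAIM (what is proved, stated in full; the proofs are below) =====
def Claim_equal_steuer : Prop := ∀ (liste : List Int), Dom_steuer liste → Spec_steuer liste (steuer liste)

-- ===== LEMMAS AND PROOFS =====

-- the dict state A's loop maintains, keyed by the four bracket names
def pvD (a b c d : Int) : PySem.Dict String Int :=
  (((PySem.Dict.empty.insert "0" a).insert "1" b).insert "2" c).insert "3" d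

-- A's loop body, named for the proofs
def pvStepA (d : PySem.Dict String Int) (elem : Int) : PySem.Dict String Int :=
  let i : Int :=
    if elem ≤ 10000 then 0
    else if elem ≤ 30000 then 1
    else if elem ≤ 70000 then 2
    else 3
  d.modify (PySem.Int.toStr i) 0 (· + 1)

lemma steuer_eq_fold (liste : List Int) :
    steuer liste = (liste.foldl pvStepA (pvD 0 0 0 0)).items := rfl

lemma pvStepA_D (a b c d e : Int) :
    pvStepA (pvD a b c d) e =
      if e ≤ 10000 then pvD (a + 1) b c d
      else if e ≤ 30000 then pvD a (b + 1) c d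
      else if e ≤ 70000 then pvD a b (c + 1) d
      else pvD a b c (d + 1) := by
  unfold pvStepA pvD
  split_ifs <;> simp [*] <;> rfl

lemma pvD_ext {a b c d a' b' c' d' : Int} (h1 : a = a') (h2 : b = b')
    (h3 : c = c') (h4 : d = d') : pvD a b c d = pvD a' b' c' d' := by
  subst h1 h2 h3 h4; rfl

lemma pvD_items (a b c d : Int) :
    (pvD a b c d).items = [("0", a), ("1", b), ("2", c), ("3", d)] := rfl

lemma fold_D (liste : List Int) : ∀ (a b c d : Int),
    List.foldl pvStepA (pvD a b c d) liste =
      pvD (a + liste.countP (fun e => e ≤ 10000))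
          (b + liste.countP (fun e => ¬ e ≤ 10000 ∧ e ≤ 30000))
          (c + liste.countP (fun e => ¬ e ≤ 30000 ∧ e ≤ 70000))
          (d + liste.countP (fun e => ¬ e ≤ 70000)) := by
  induction liste with
  | nil => intro a b c d; simp
  | cons x xs ih =>
    intro a b c d
    rw [List.foldl_cons, pvStepA_D]
    split_ifs with h1 h2 h3
    · rw [ih]
      exact pvD_ext (by simp only [List.countP_cons]; split_ifs <;> simp_all <;> omega)
        (by simp only [List.countP_cons]; split_ifs <;> simp_all <;> omega) (by simp only [List.countP_cons]; split_ifs <;> simp_all <;> omega)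
        (by simp only [List.countP_cons]; split_ifs <;> simp_all <;> omega)
    · rw [ih]
      exact pvD_ext (by simp only [List.countP_cons]; split_ifs <;> simp_all <;> omega)
        (by simp only [List.countP_cons]; split_ifs <;> simp_all <;> omega)
        (by simp only [List.countP_cons]; split_ifs <;> simp_all <;> omega)
        (by simp only [List.countP_cons]; split_ifs <;> simp_all <;> omega)
    · rw [ih]
      exact pvD_ext (by simp only [List.countP_cons]; split_ifs <;> simp_all <;> omega)
        (by simp only [List.countP_cons]; split_ifs <;> simp_all <;> omega)
        (by simp only [List.countP_cons]; split_ifs <;> simp_all <;> omega)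
        (by simp only [List.countP_cons]; split_ifs <;> simp_all <;> omega)
    · rw [ih]
      exact pvD_ext (by simp only [List.countP_cons]; split_ifs <;> simp_all <;> omega)
        (by simp only [List.countP_cons]; split_ifs <;> simp_all <;> omega)
        (by simp only [List.countP_cons]; split_ifs <;> simp_all <;> omega)
        (by simp only [List.countP_cons]; split_ifs <;> simp_all <;> omega)

lemma countP_30000 (liste : List Int) :
    liste.countP (fun e => e ≤ 30000) =
      liste.countP (fun e => e ≤ 10000) + liste.countP (fun e => ¬ e ≤ 10000 ∧ e ≤ 30000) := by
  induction liste with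
  | nil => rfl
  | cons x xs ih => simp only [List.countP_cons]; split_ifs <;> simp_all <;> omega

lemma countP_70000 (liste : List Int) :
    liste.countP (fun e => e ≤ 70000) =
      liste.countP (fun e => e ≤ 30000) + liste.countP (fun e => ¬ e ≤ 30000 ∧ e ≤ 70000) := by
  induction liste with
  | nil => rfl
  | cons x xs ih => simp only [List.countP_cons]; split_ifs <;> simp_all <;> omega

lemma countP_len (liste : List Int) :
    liste.length =
      liste.countP (fun e => e ≤ 70000) + liste.countP (fun e => ¬ e ≤ 70000) := by
  induction liste with
  | nil => rfl
  | cons x xs ih => simp only [List.countP_cons, List.length_cons]; split_ifs <;> simp_all <;> omega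

-- ===== VERDICT (by name: the statement is the Claim_ definition above) =====
theorem steuer_spec : Claim_equal_steuer := by
  intro liste _
  show steuer liste = steuer_alt liste
  rw [steuer_eq_fold, fold_D, pvD_items]
  unfold steuer_alt
  have h2 := countP_30000 liste
  have h3 := countP_70000 liste
  have hl := countP_len liste
  simp only [zero_add, List.cons.injEq, Prod.mk.injEq, and_true, true_and]
  refine ⟨?_, ?_, ?_⟩ <;> push_cast <;> omega
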